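-- pv_equiv track=rewrite | github.com/Przemyslawmd/MathExpression | postfix/calculator.py | check_continuity
-- ===== SOURCE A (Python) =====
-- from enum import Enum
--
-- class Direction(Enum):
--     CONST = 0
--     DOWN = 1
--     UP = 2
--     NONE = 3
--
-- def check_directions(numbers) -> list:
--     directions = [Direction.NONE] * len(numbers)
--     for index, number in enumerate(numbers):
--         if index == 0:
--             continue
--         elif number > numbers[index - 1]:
--             directions[index] = Direction.UP
--         elif number < numbers[index - 1]:
--             directions[index] = Direction.DOWN
--         else:
--             directions[index] = Direction.CONST
--     return directions
--
-- def is_discontinuity(direction_prev, direction_curr, number_prev, number_curr) -> bool: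
--     if all((direction_prev is Direction.UP, direction_curr is Direction.DOWN, number_prev > 0, number_curr < 0)):
--         return True
--     if all((direction_prev is Direction.DOWN, direction_curr is Direction.UP, number_prev < 0, number_curr > 0)):
--         return True
--     return False
--
-- def check_continuity(numbers) -> list:
--     directions = check_directions(numbers)
--     discontinuity_points = []
--     for index, direction in enumerate(directions):
--         if direction != directions[index - 1]:
--             if is_discontinuity(directions[index - 1], direction, numbers[index - 1], numbers[index]):
--                 discontinuity_points.append(index)
--     return discontinuity_points
-- ===== SOURCE B (Python) =====
-- def check_continuity(numbers):
--     # Single pass over index triples; no Direction list is built. A point i is a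
--     # discontinuity exactly when the sequence was rising into a positive value and
--     # drops below zero (or falling into a negative value and jumps above zero).
--     return [i for i in range(2, len(numbers))
--             if (numbers[i - 2] < numbers[i - 1] and numbers[i - 1] > 0 and numbers[i] < 0)
--             or (numbers[i - 2] > numbers[i - 1] and numbers[i - 1] < 0 and numbers[i] > 0)]
-- ===== Notes on version B (the rewrite author's own statement) =====
-- stated objective: simpler
-- what changed: B drops the Direction enum and the intermediate directions list entirely: one comprehension over index triples tests the sign/trend condition directly on numbers[i-2], numbers[i-1], numbers[i] (the DOWN/UP half of each test is implied by the sign change, so it disappears).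
import Mathlib
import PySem

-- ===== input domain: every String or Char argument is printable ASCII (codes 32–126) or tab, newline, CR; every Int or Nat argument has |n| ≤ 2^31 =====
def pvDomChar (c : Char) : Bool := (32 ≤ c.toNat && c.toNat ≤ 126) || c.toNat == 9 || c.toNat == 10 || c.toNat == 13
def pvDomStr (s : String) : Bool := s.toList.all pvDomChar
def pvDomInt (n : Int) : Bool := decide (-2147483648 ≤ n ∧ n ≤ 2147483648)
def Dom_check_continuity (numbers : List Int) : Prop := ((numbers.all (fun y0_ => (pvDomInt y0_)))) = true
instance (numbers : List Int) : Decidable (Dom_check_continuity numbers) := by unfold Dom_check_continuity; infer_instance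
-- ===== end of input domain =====

-- B replaces A's two passes (a directions list, then a scan of it) by one comprehension
-- testing the sign/trend condition directly on number triples; same values, same cost.

-- ===== PORT A =====
inductive Direction where
  | CONST | DOWN | UP | NONE
deriving DecidableEq, Repr

-- indices written by the loop are 1 ≤ index < len, so numbers[index-1] is in range (pyGetD exact)
def check_directions (numbers : List Int) : List Direction :=
  (PySem.List.enumerate numbers 0).foldl
    (fun ds p =>
      if p.1 = 0 then ds
      else if p.2 > PySem.List.pyGetD numbers (p.1 - 1) 0 then PySem.List.pySetD ds p.1 Direction.UP
      else if p.2 < PySem.List.pyGetD numbers (p.1 - 1) 0 then PySem.List.pySetD ds p.1 Direction.DOWN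
      else PySem.List.pySetD ds p.1 Direction.CONST)
    (List.replicate numbers.length Direction.NONE)

def is_discontinuity (direction_prev direction_curr : Direction) (number_prev number_curr : Int) : Bool :=
  if direction_prev = Direction.UP ∧ direction_curr = Direction.DOWN ∧ number_prev > 0 ∧ number_curr < 0 then
    true
  else if direction_prev = Direction.DOWN ∧ direction_curr = Direction.UP ∧ number_prev < 0 ∧ number_curr > 0 then
    true
  else
    false

-- index ranges over 0 ≤ index < len; directions[index-1] / numbers[index-1] at index 0 is Python's
-- wraparound xs[-1], which pyGetD reproduces exactly on the nonempty lists the loop runs over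
def check_continuity (numbers : List Int) : List Int :=
  (PySem.List.enumerate (check_directions numbers) 0).foldl
    (fun acc p =>
      if p.2 ≠ PySem.List.pyGetD (check_directions numbers) (p.1 - 1) Direction.NONE then
        if is_discontinuity (PySem.List.pyGetD (check_directions numbers) (p.1 - 1) Direction.NONE) p.2
            (PySem.List.pyGetD numbers (p.1 - 1) 0) (PySem.List.pyGetD numbers p.1 0) then
          acc ++ [p.1]
        else acc
      else acc)
    []

-- ===== PORT B =====
-- all indices i-2, i-1, i are in range for 2 ≤ i < len (pyGetD exact)
def check_continuity_alt (numbers : List Int) : List Int :=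
  (PySem.List.pyRange 2 numbers.length 1).filter fun i =>
    (PySem.List.pyGetD numbers (i - 2) 0 < PySem.List.pyGetD numbers (i - 1) 0
      ∧ PySem.List.pyGetD numbers (i - 1) 0 > 0 ∧ PySem.List.pyGetD numbers i 0 < 0)
    ∨ (PySem.List.pyGetD numbers (i - 2) 0 > PySem.List.pyGetD numbers (i - 1) 0
      ∧ PySem.List.pyGetD numbers (i - 1) 0 < 0 ∧ PySem.List.pyGetD numbers i 0 > 0)

-- ===== PRECONDITION & SPEC =====
def Spec_check_continuity (numbers : List Int) (out : List Int) : Prop := out = check_continuity_alt numbers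
instance (numbers : List Int) (out : List Int) : Decidable (Spec_check_continuity numbers out) := by unfold Spec_check_continuity; infer_instance

-- ===== CLAIM (what is proved, stated in full; the proofs are below) =====
def Claim_equal_check_continuity : Prop := ∀ (numbers : List Int), Dom_check_continuity numbers → Spec_check_continuity numbers (check_continuity numbers)

-- ===== LEMMAS AND PROOFS =====

-- direction assigned by A at index i >= 1
def dirAt (numbers : List Int) (i : Int) : Direction :=
  if PySem.List.pyGetD numbers i 0 > PySem.List.pyGetD numbers (i - 1) 0 then Direction.UP
  else if PySem.List.pyGetD numbers i 0 < PySem.List.pyGetD numbers (i - 1) 0 then Direction.DOWN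
  else Direction.CONST

-- the fold body of check_directions, after enumerate is expressed over pyRange
def stepD (numbers : List Int) (ds : List Direction) (j : Int) : List Direction :=
  if j = 0 then ds
  else if PySem.List.pyGetD numbers j 0 > PySem.List.pyGetD numbers (j - 1) 0 then PySem.List.pySetD ds j Direction.UP
  else if PySem.List.pyGetD numbers j 0 < PySem.List.pyGetD numbers (j - 1) 0 then PySem.List.pySetD ds j Direction.DOWN
  else PySem.List.pySetD ds j Direction.CONST

-- the test A applies at enumerated index j in its second loop
def condA (numbers : List Int) (j : Int) : Bool :=
  decide (¬ (PySem.List.pyGetD (check_directions numbers) j Direction.NONE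
      = PySem.List.pyGetD (check_directions numbers) (j - 1) Direction.NONE)) &&
  is_discontinuity (PySem.List.pyGetD (check_directions numbers) (j - 1) Direction.NONE)
    (PySem.List.pyGetD (check_directions numbers) j Direction.NONE)
    (PySem.List.pyGetD numbers (j - 1) 0) (PySem.List.pyGetD numbers j 0)

-- B's filter test
def condB (numbers : List Int) (i : Int) : Bool :=
  decide ((PySem.List.pyGetD numbers (i - 2) 0 < PySem.List.pyGetD numbers (i - 1) 0
    ∧ PySem.List.pyGetD numbers (i - 1) 0 > 0 ∧ PySem.List.pyGetD numbers i 0 < 0)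
  ∨ (PySem.List.pyGetD numbers (i - 2) 0 > PySem.List.pyGetD numbers (i - 1) 0
    ∧ PySem.List.pyGetD numbers (i - 1) 0 < 0 ∧ PySem.List.pyGetD numbers i 0 > 0))

theorem stepD_eq_set (numbers : List Int) (ds : List Direction) (j : Int) (hj : j ≠ 0) :
    stepD numbers ds j = PySem.List.pySetD ds j (dirAt numbers j) := by
  unfold stepD dirAt
  rw [if_neg hj]
  split_ifs <;> rfl

theorem dirs_char (numbers : List Int) (m : Nat) (hm : m ≤ numbers.length) :
    ((PySem.List.pyRange 0 m).foldl (stepD numbers) (List.replicate numbers.length Direction.NONE)).length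
      = numbers.length ∧
    ∀ k : Nat,
      PySem.List.pyGetD ((PySem.List.pyRange 0 m).foldl (stepD numbers)
          (List.replicate numbers.length Direction.NONE)) (k : Int) Direction.NONE
        = if 1 ≤ k ∧ k < m then dirAt numbers (k : Int) else Direction.NONE := by
  induction m with
  | zero =>
    rw [PySem.List.pyRange_one_eq_nil (by norm_num)]
    refine ⟨by simp, fun k => ?_⟩
    have h1 : ¬ (1 ≤ k ∧ k < 0) := by omega
    rw [if_neg h1, PySem.List.pyGetD_of_nonneg _ _ (by positivity),
      List.getD_eq_getElem?_getD, List.foldl_nil, List.getElem?_replicate]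
    split <;> rfl
  | succ m ih =>
    have ihm := ih (by omega)
    have hcast : ((m + 1 : Nat) : Int) = (m : Int) + 1 := by push_cast; ring
    rw [hcast, PySem.List.pyRange_one_succ_right (by positivity), List.foldl_append]
    simp only [List.foldl_cons, List.foldl_nil]
    by_cases h0 : (m : Int) = 0
    · have hm0 : m = 0 := by omega
      subst hm0
      refine ⟨by simp [stepD], fun k => ?_⟩
      have hst : stepD numbers ((PySem.List.pyRange 0 ((0:Nat):Int)).foldl (stepD numbers)
          (List.replicate numbers.length Direction.NONE)) ((0:Nat):Int)
          = (PySem.List.pyRange 0 ((0:Nat):Int)).foldl (stepD numbers)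
            (List.replicate numbers.length Direction.NONE) := by
        simp [stepD]
      rw [hst, ihm.2 k]
      have h1 : ¬ (1 ≤ k ∧ k < 0) := by omega
      have h2 : ¬ (1 ≤ k ∧ k < 0 + 1) := by omega
      try rw [if_neg h1, if_neg h2]
    · rw [stepD_eq_set numbers _ _ h0]
      have hmlt : m < ((PySem.List.pyRange 0 m).foldl (stepD numbers)
          (List.replicate numbers.length Direction.NONE)).length := by
        rw [ihm.1]; omega
      refine ⟨by rw [PySem.List.length_pySetD, ihm.1], fun k => ?_⟩
      rw [PySem.List.pyGetD_pySetD_natCast _ m k _ _ hmlt, ihm.2 k]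
      by_cases hk : k = m
      · subst hk
        rw [if_pos rfl, if_pos (by omega)]
      · rw [if_neg hk]
        by_cases hin : 1 ≤ k ∧ k < m
        · rw [if_pos hin, if_pos (by omega)]
        · rw [if_neg hin, if_neg (by omega)]

theorem check_directions_eq_fold (numbers : List Int) :
    check_directions numbers
      = (PySem.List.pyRange 0 numbers.length).foldl (stepD numbers)
          (List.replicate numbers.length Direction.NONE) := by
  unfold check_directions
  rw [PySem.List.enumerate_eq_map_pyRange numbers 0, List.foldl_map]
  simp only [PySem.List.len_eq]
  rfl

theorem check_directions_get (numbers : List Int) (k : Nat) :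
    PySem.List.pyGetD (check_directions numbers) (k : Int) Direction.NONE
      = if 1 ≤ k ∧ k < numbers.length then dirAt numbers (k : Int) else Direction.NONE := by
  rw [check_directions_eq_fold]
  exact (dirs_char numbers numbers.length le_rfl).2 k

theorem check_continuity_eq_filter (numbers : List Int) :
    check_continuity numbers
      = (PySem.List.pyRange 0 numbers.length).filter (condA numbers) := by
  unfold check_continuity
  have hlen : (check_directions numbers).length = numbers.length := by
    rw [check_directions_eq_fold]
    exact (dirs_char numbers numbers.length le_rfl).1
  rw [PySem.List.enumerate_eq_map_pyRange (check_directions numbers) Direction.NONE, List.foldl_map]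
  simp only [PySem.List.len_eq, hlen]
  have hfun : (fun (acc : List Int) (j : Int) =>
      if PySem.List.pyGetD (check_directions numbers) j Direction.NONE
          ≠ PySem.List.pyGetD (check_directions numbers) (j - 1) Direction.NONE then
        if is_discontinuity (PySem.List.pyGetD (check_directions numbers) (j - 1) Direction.NONE)
            (PySem.List.pyGetD (check_directions numbers) j Direction.NONE)
            (PySem.List.pyGetD numbers (j - 1) 0) (PySem.List.pyGetD numbers j 0) then
          acc ++ [j]
        else acc
      else acc)
      = fun (acc : List Int) (j : Int) => if condA numbers j then acc ++ [j] else acc := by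
    funext acc j
    unfold condA
    split_ifs <;> simp_all
  rw [hfun, PySem.List.foldl_append_if_eq_filter]
  rfl

theorem is_disc_curr_none (p : Direction) (x y : Int) :
    is_discontinuity p Direction.NONE x y = false := by
  unfold is_discontinuity
  split_ifs <;> simp_all

theorem is_disc_prev_none (c : Direction) (x y : Int) :
    is_discontinuity Direction.NONE c x y = false := by
  unfold is_discontinuity
  split_ifs <;> simp_all

theorem condA_zero_false (numbers : List Int) : condA numbers 0 = false := by
  have h0 := check_directions_get numbers 0
  rw [if_neg (by omega)] at h0
  rw [show ((0:Nat):Int) = (0:Int) from rfl] at h0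
  unfold condA
  rw [h0, is_disc_curr_none, Bool.and_false]

theorem condA_one_false (numbers : List Int) : condA numbers 1 = false := by
  have h0 := check_directions_get numbers 0
  rw [if_neg (by omega)] at h0
  unfold condA
  rw [show (1:Int) - 1 = ((0:Nat):Int) by norm_num, h0, is_disc_prev_none, Bool.and_false]

set_option maxRecDepth 10000 in
theorem condA_iff_condB (numbers : List Int) (j : Int) (h2 : 2 ≤ j)
    (hn : j < (numbers.length : Int)) : condA numbers j = condB numbers j := by
  have hj : j = ((j.toNat : Nat) : Int) := by omega
  have hj1 : j - 1 = (((j.toNat - 1 : Nat) : Nat) : Int) := by omega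
  have hcur := check_directions_get numbers j.toNat
  rw [← hj, if_pos (by omega)] at hcur
  have hprev := check_directions_get numbers (j.toNat - 1)
  rw [← hj1, if_pos (by omega)] at hprev
  unfold condA condB
  rw [hcur, hprev]
  unfold dirAt is_discontinuity
  rw [show j - 1 - 1 = j - 2 by ring]
  generalize PySem.List.pyGetD numbers (j - 2) 0 = x
  generalize PySem.List.pyGetD numbers (j - 1) 0 = y
  generalize PySem.List.pyGetD numbers j 0 = z
  clear hj hj1 hcur hprev h2 hn
  split_ifs <;> (try simp_all) <;> omega

theorem check_continuity_alt_eq_filter (numbers : List Int) :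
    check_continuity_alt numbers
      = (PySem.List.pyRange 2 numbers.length).filter (condB numbers) := by
  unfold check_continuity_alt condB
  rfl

theorem main_eq (numbers : List Int) :
    check_continuity numbers = check_continuity_alt numbers := by
  rw [check_continuity_eq_filter, check_continuity_alt_eq_filter]
  by_cases hn : 2 ≤ (numbers.length : Int)
  · rw [PySem.List.pyRange_one_append 0 2 numbers.length (by norm_num) hn,
      List.filter_append]
    have hr2 : PySem.List.pyRange 0 2 = [0, 1] := by decide
    rw [hr2]
    simp only [List.filter_cons, List.filter_nil, condA_zero_false, condA_one_false,
      Bool.false_eq_true, if_false, List.nil_append]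
    refine List.filter_congr ?_
    intro j hj
    have hmem := (PySem.List.mem_pyRange_one).mp hj
    exact condA_iff_condB numbers j hmem.1 hmem.2
  · rcases numbers with _ | ⟨x, _ | ⟨y, t⟩⟩
    · rw [show ((List.length ([] : List Int)) : Int) = 0 by simp,
        PySem.List.pyRange_one_eq_nil (by norm_num : (0:Int) ≤ 0)]
      rw [PySem.List.pyRange_one_eq_nil (by norm_num : (0:Int) ≤ 2)]
      rfl
    · rw [show ((List.length ([x] : List Int)) : Int) = 1 by simp,
        PySem.List.pyRange_one_eq_nil (by norm_num : (1:Int) ≤ 2), List.filter_nil,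
        show PySem.List.pyRange 0 (1:Int) = [0] by decide]
      simp [condA_zero_false]
    · exfalso
      apply hn
      simp
      omega

-- ===== VERDICT (by name: the statement is the Claim_ definition above) =====
theorem check_continuity_spec : Claim_equal_check_continuity := by
  intro numbers _
  unfold Spec_check_continuity
  exact main_eq numbers
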